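-- pv_equiv track=rewrite | github.com/bldaj/Knights | battle.py | enemy_action_logic
-- ===== SOURCE A (Python) =====
-- def enemy_action_logic(chances: dict, damages: dict) -> str:
--     sorted_chances = sorted((v, k) for (k, v) in chances.items())
--
--     max_damage = 0
--     max_chance = 0
--     enemy_choice = None
--
--     for chance in sorted_chances:
--         if chance[0] > max_chance:
--             max_chance = chance[0]
--             enemy_choice = chance[1]
--         elif chance[0] == max_chance:
--             # TODO: add analyze enemy damage and energy and hero health and armor for equal hit chances
--             pass
--
--     return enemy_choice
-- ===== SOURCE B (Python) =====
-- def enemy_action_logic(chances: dict, damages: dict) -> str: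
--     best_chance = 0
--     choice = None
--     for key, chance in chances.items():
--         if chance > best_chance or (chance == best_chance and choice is not None and key < choice):
--             best_chance = chance
--             choice = key
--     return choice
-- ===== Notes on version B (the rewrite author's own statement) =====
-- stated objective: faster
-- what changed: A sorts all (chance, key) pairs and then scans the sorted list taking strict improvements; B does one linear pass over the dict tracking the max chance and the smallest key among ties, with no sort.
import Mathlib
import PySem

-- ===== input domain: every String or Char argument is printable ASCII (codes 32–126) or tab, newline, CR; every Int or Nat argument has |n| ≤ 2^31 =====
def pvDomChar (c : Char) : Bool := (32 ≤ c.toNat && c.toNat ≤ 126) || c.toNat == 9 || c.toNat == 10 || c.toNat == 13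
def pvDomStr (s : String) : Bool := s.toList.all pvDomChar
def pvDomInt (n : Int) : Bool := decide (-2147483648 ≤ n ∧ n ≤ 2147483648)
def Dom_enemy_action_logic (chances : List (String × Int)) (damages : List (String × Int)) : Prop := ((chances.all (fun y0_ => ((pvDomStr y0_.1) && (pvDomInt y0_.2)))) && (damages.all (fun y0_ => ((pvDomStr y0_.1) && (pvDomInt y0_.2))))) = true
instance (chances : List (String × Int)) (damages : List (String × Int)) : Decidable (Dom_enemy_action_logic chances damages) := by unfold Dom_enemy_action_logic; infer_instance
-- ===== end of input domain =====

-- B replaces A's sort-then-scan by a single linear scan tracking the max chance and the smallest tying key (objective: faster).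

-- ===== PORT A =====
def enemy_action_logic (chances : List (String × Int)) (_damages : List (String × Int)) : Option String :=
  let sorted_chances := PySem.List.sorted2 (chances.map (fun kv => (kv.2, kv.1))) (fun p => p.1) (fun p => p.2)
  let st := sorted_chances.foldl
    (fun (s : Int × Option String) chance =>
      if chance.1 > s.1 then (chance.1, some chance.2) else s)
    ((0 : Int), (none : Option String))
  st.2

-- ===== PORT B =====
def enemy_action_logic_alt (chances : List (String × Int)) (_damages : List (String × Int)) : Option String :=
  let st := chances.foldl
    (fun (s : Int × Option String) kv =>
      if kv.2 > s.1 ∨ (kv.2 = s.1 ∧ (s.2.any fun c => decide (kv.1 < c)) = true)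
      then (kv.2, some kv.1) else s)
    ((0 : Int), (none : Option String))
  st.2

-- ===== PRECONDITION & SPEC =====
def Spec_enemy_action_logic (chances : List (String × Int)) (damages : List (String × Int)) (out : Option String) : Prop := out = enemy_action_logic_alt chances damages
instance (chances : List (String × Int)) (damages : List (String × Int)) (out : Option String) : Decidable (Spec_enemy_action_logic chances damages out) := by unfold Spec_enemy_action_logic; infer_instance

-- ===== CLAIM (what is proved, stated in full; the proofs are below) =====
def Claim_equal_enemy_action_logic : Prop := ∀ (chances : List (String × Int)) (damages : List (String × Int)), Dom_enemy_action_logic chances damages → Spec_enemy_action_logic chances damages (enemy_action_logic chances damages)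

-- ===== LEMMAS AND PROOFS =====

-- lexicographic ≤ on (chance, key) pairs: the order A's sort arranges
def pvLe (p q : Int × String) : Prop := p.1 < q.1 ∨ (p.1 = q.1 ∧ p.2 ≤ q.2)

-- the boolean comparison sorted2 uses on our pairs
def pvBefore (p q : Int × String) : Bool :=
  decide (p.1 < q.1) || (!decide (q.1 < p.1) && decide (p.2 < q.2))

-- A's loop step (over (chance, key) pairs)
def pvStepA (s : Int × Option String) (p : Int × String) : Int × Option String :=
  if p.1 > s.1 then (p.1, some p.2) else s

-- B's loop step (over (key, chance) pairs)
def pvStepB (s : Int × Option String) (kv : String × Int) : Int × Option String :=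
  if kv.2 > s.1 ∨ (kv.2 = s.1 ∧ (s.2.any fun c => decide (kv.1 < c)) = true)
  then (kv.2, some kv.1) else s

-- B's loop step transported to (chance, key) pairs
def pvStepB' (s : Int × Option String) (p : Int × String) : Int × Option String :=
  pvStepB s (p.2, p.1)

lemma pvBefore_iff (p q : Int × String) :
    pvBefore p q = true ↔ (p.1 < q.1 ∨ (p.1 = q.1 ∧ p.2 < q.2)) := by
  simp only [pvBefore, Bool.or_eq_true, Bool.and_eq_true, Bool.not_eq_eq_eq_not,
    Bool.not_true, decide_eq_true_eq, decide_eq_false_iff_not]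
  constructor
  · rintro (h | ⟨h1, h2⟩)
    · exact Or.inl h
    · rcases lt_trichotomy p.1 q.1 with h | h | h
      · exact Or.inl h
      · exact Or.inr ⟨h, h2⟩
      · exact absurd h h1
  · rintro (h | ⟨h1, h2⟩)
    · exact Or.inl h
    · exact Or.inr ⟨by omega, h2⟩

lemma pvLe_of_not_before {p q : Int × String} (h : ¬ pvBefore q p = true) : pvLe p q := by
  rw [pvBefore_iff] at h
  rcases lt_trichotomy p.1 q.1 with h1 | h1 | h1
  · exact Or.inl h1
  · refine Or.inr ⟨h1, ?_⟩
    by_contra hlt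
    exact h (Or.inr ⟨h1.symm, not_le.mp hlt⟩)
  · exact absurd (Or.inl h1) h

lemma pvLe_of_before {p q : Int × String} (h : pvBefore p q = true) : pvLe p q := by
  rcases (pvBefore_iff p q).mp h with h' | ⟨h1, h2⟩
  · exact Or.inl h'
  · exact Or.inr ⟨h1, le_of_lt h2⟩

lemma pvLe_trans {p q r : Int × String} (h1 : pvLe p q) (h2 : pvLe q r) : pvLe p r := by
  rcases h1 with h1 | ⟨h1, h1'⟩ <;> rcases h2 with h2 | ⟨h2, h2'⟩
  · exact Or.inl (h1.trans h2)
  · exact Or.inl (by omega)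
  · exact Or.inl (by omega)
  · exact Or.inr ⟨by omega, h1'.trans h2'⟩

lemma pairwise_insertBy (x : Int × String) (ys : List (Int × String))
    (h : ys.Pairwise pvLe) :
    (PySem.List.insertBy pvBefore x ys).Pairwise pvLe := by
  induction ys with
  | nil => simp [PySem.List.insertBy]
  | cons y ys ih =>
    rw [List.pairwise_cons] at h
    obtain ⟨hy, hys⟩ := h
    rw [PySem.List.insertBy]
    by_cases hb : pvBefore x y = true
    · rw [if_pos hb]
      refine List.pairwise_cons.mpr ⟨?_, List.pairwise_cons.mpr ⟨hy, hys⟩⟩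
      intro z hz
      rcases List.mem_cons.mp hz with rfl | hz
      · exact pvLe_of_before hb
      · exact pvLe_trans (pvLe_of_before hb) (hy z hz)
    · rw [if_neg hb]
      refine List.pairwise_cons.mpr ⟨?_, ih hys⟩
      intro z hz
      rcases (PySem.List.mem_insertBy pvBefore x z ys).mp hz with rfl | hz
      · exact pvLe_of_not_before hb
      · exact hy z hz

lemma pairwise_foldl_insertBy (xs : List (Int × String)) (acc : List (Int × String))
    (h : acc.Pairwise pvLe) :
    (xs.foldl (fun a x => PySem.List.insertBy pvBefore x a) acc).Pairwise pvLe := by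
  induction xs generalizing acc with
  | nil => exact h
  | cons x xs ih => exact ih _ (pairwise_insertBy x acc h)

lemma sorted2_pairwise_pvLe (l : List (Int × String)) :
    (PySem.List.sorted2 l (fun p => p.1) (fun p => p.2)).Pairwise pvLe :=
  pairwise_foldl_insertBy l [] List.Pairwise.nil

-- B's step written with a propositional condition (easier to case on)
lemma pvStepB'_eq (m : Int) (c : Option String) (v : Int) (k : String) :
    pvStepB' (m, c) (v, k) = if v > m ∨ (v = m ∧ ∃ cv, c = some cv ∧ k < cv)
      then (v, some k) else (m, c) := by
  rcases c with _ | cv <;>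
    simp [pvStepB', pvStepB]

lemma pvStepB'_rcomm : ∀ (s : Int × Option String) (a b : Int × String),
    pvStepB' (pvStepB' s a) b = pvStepB' (pvStepB' s b) a := by
  intro s a b
  obtain ⟨m, c⟩ := s
  obtain ⟨va, ka⟩ := a
  obtain ⟨vb, kb⟩ := b
  simp only [pvStepB'_eq]
  by_cases h1 : va > m ∨ (va = m ∧ ∃ cv, c = some cv ∧ ka < cv) <;>
    by_cases h2 : vb > m ∨ (vb = m ∧ ∃ cv, c = some cv ∧ kb < cv)
  · rw [if_pos h1, if_pos h2]
    simp only [pvStepB'_eq]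
    by_cases d1 : vb > va ∨ (vb = va ∧ ∃ cv, some ka = some cv ∧ kb < cv) <;>
      by_cases d2 : va > vb ∨ (va = vb ∧ ∃ cv, some kb = some cv ∧ ka < cv)
    · exfalso
      rcases d1 with d1 | ⟨e1, cv1, hc1, s1⟩ <;> rcases d2 with d2 | ⟨e2, cv2, hc2, s2⟩
      · omega
      · omega
      · omega
      · cases hc1; cases hc2; exact absurd (lt_trans s1 s2) (lt_irrefl _)
    · rw [if_pos d1, if_neg d2]
    · rw [if_neg d1, if_pos d2]
    · rw [if_neg d1, if_neg d2]
      have e : va = vb := by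
        rcases not_or.mp d1 with ⟨n1, _⟩
        rcases not_or.mp d2 with ⟨n3, _⟩
        omega
      subst e
      have k1 : ¬ kb < ka := fun hk => (not_or.mp d1).2 ⟨rfl, ka, rfl, hk⟩
      have k2 : ¬ ka < kb := fun hk => (not_or.mp d2).2 ⟨rfl, kb, rfl, hk⟩
      have : ka = kb := le_antisymm (le_of_not_gt k1) (le_of_not_gt k2)
      rw [this]
  · rw [if_pos h1, if_neg h2]
    simp only [pvStepB'_eq]
    rw [if_pos h1, if_neg]
    rintro (hb | ⟨e, cv, hcv, hk⟩)
    · rcases h1 with h1 | ⟨e1, _⟩ <;> rcases not_or.mp h2 with ⟨n1, _⟩ <;> omega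
    · cases hcv
      rcases h1 with h1 | ⟨e1, cv1, hc1, s1⟩
      · omega
      · exact (not_or.mp h2).2 ⟨by omega, cv1, hc1, lt_trans hk s1⟩
  · rw [if_neg h1, if_pos h2]
    simp only [pvStepB'_eq]
    rw [if_pos h2, if_neg]
    rintro (ha | ⟨e, cv, hcv, hk⟩)
    · rcases h2 with h2 | ⟨e2, _⟩ <;> rcases not_or.mp h1 with ⟨n1, _⟩ <;> omega
    · cases hcv
      rcases h2 with h2 | ⟨e2, cv2, hc2, s2⟩
      · omega
      · exact (not_or.mp h1).2 ⟨by omega, cv2, hc2, lt_trans hk s2⟩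
  · rw [if_neg h1, if_neg h2]
    simp only [pvStepB'_eq]
    rw [if_neg h2, if_neg h1]

-- on a lex-sorted list A's tie-ignoring scan and B's tie-aware scan coincide
lemma foldl_stepA_eq_stepB' (l : List (Int × String)) (s : Int × Option String)
    (hsort : l.Pairwise pvLe)
    (hinv : ∀ p ∈ l, ∀ c, s.2 = some c → p.1 = s.1 → ¬ p.2 < c) :
    l.foldl pvStepA s = l.foldl pvStepB' s := by
  induction l generalizing s with
  | nil => rfl
  | cons p l ih =>
    rw [List.pairwise_cons] at hsort
    obtain ⟨hp, hsort⟩ := hsort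
    obtain ⟨m, c⟩ := s
    obtain ⟨pv, pk⟩ := p
    simp only [List.foldl_cons]
    by_cases hgt : pv > m
    · have hA : pvStepA (m, c) (pv, pk) = (pv, some pk) := by simp [pvStepA, hgt]
      have hB : pvStepB' (m, c) (pv, pk) = (pv, some pk) := by
        rw [pvStepB'_eq, if_pos (Or.inl hgt)]
      rw [hA, hB]
      refine ih _ hsort ?_
      intro q hq cv hcv hq1
      simp only [Option.some.injEq] at hcv
      subst hcv
      rcases hp q hq with h | ⟨_, h⟩
      · simp at h hq1; omega
      · exact not_lt_of_ge h
    · have hA : pvStepA (m, c) (pv, pk) = (m, c) := by simp [pvStepA, hgt]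
      have hB : pvStepB' (m, c) (pv, pk) = (m, c) := by
        rw [pvStepB'_eq, if_neg]
        rintro (h | ⟨hpm, cv, hcv, hk⟩)
        · exact hgt h
        · exact hinv (pv, pk) (List.mem_cons_self ..) cv hcv hpm hk
      rw [hA, hB]
      exact ih _ hsort (fun q hq cv hcv hq1 => hinv q (List.mem_cons_of_mem _ hq) cv hcv hq1)

-- ===== VERDICT (by name: the statement is the Claim_ definition above) =====
theorem enemy_action_logic_spec : Claim_equal_enemy_action_logic := by
  intro chances damages _
  show enemy_action_logic chances damages = enemy_action_logic_alt chances damages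
  show ((PySem.List.sorted2 (chances.map fun kv => (kv.2, kv.1)) (fun p => p.1) (fun p => p.2)).foldl
          pvStepA ((0 : Int), (none : Option String))).2
      = ((chances.foldl pvStepB ((0 : Int), (none : Option String))).2)
  rw [foldl_stepA_eq_stepB' _ _ (sorted2_pairwise_pvLe _) (by intro p hp cv hcv; simp at hcv)]
  haveI : RightCommutative pvStepB' := ⟨pvStepB'_rcomm⟩
  rw [(PySem.List.sorted2_perm (chances.map fun kv => (kv.2, kv.1)) (fun p => p.1) (fun p => p.2) false).foldl_eq]
  rw [List.foldl_map]
  rfl
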